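-- pv_equiv track=rewrite | github.com/cor1nthian/vidfrommp3 | main.py | prepXFShortname
-- ===== SOURCE A (Python) =====
-- def prepXFShortname(xfname: str):
--     if len(xfname) == 0:
--         return None
--     tstr = ''
--     out = ''
--     xfnamerev = xfname[::-1]
--     for c in xfnamerev:
--         if c.isdigit():
--             if len(out) < 2:
--                 out += c
--             else:
--                 break
--     out = out[::-1]
--     out = '[s' + out + ']'
--     return out
-- ===== SOURCE B (Python) =====
-- def prepXFShortname(xfname: str):
--     if len(xfname) == 0:
--         return None
--     ds = [c for c in xfname if c.isdigit()]
--     return '[s' + ''.join(ds[-2:]) + ']'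
-- ===== Notes on version B (the rewrite author's own statement) =====
-- stated objective: simpler
-- what changed: Replaces the double string-reversal and the early-break reverse scan with a single forward pass collecting all digits, then a slice taking the last two.
import Mathlib
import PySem

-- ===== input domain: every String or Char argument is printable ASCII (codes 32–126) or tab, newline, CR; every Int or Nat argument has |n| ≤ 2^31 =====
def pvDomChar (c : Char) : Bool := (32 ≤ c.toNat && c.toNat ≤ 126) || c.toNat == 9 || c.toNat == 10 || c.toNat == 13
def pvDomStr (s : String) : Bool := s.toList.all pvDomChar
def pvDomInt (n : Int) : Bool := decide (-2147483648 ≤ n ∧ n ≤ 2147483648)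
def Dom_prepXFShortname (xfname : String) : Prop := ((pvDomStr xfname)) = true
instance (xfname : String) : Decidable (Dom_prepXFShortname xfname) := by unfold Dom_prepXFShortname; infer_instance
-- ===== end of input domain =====

-- B replaces A's double string-reversal and early-break reverse scan by one forward
-- digit-collecting pass followed by a last-two slice (objective: simpler).

-- ===== PORT A =====
-- the 'for c in xfnamerev: …' loop with its early break ('else: break' leaves the loop with out as is)
def prepXFA_loop : List Char → List Char → List Char
  | [], out => out
  | c :: rest, out =>
    if PySem.Chars.isdigit c then
      if out.length < 2 then prepXFA_loop rest (out ++ [c]) else out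
    else prepXFA_loop rest out

def prepXFShortname (xfname : String) : Option String :=
  if PySem.Str.len xfname = 0 then none
  else
    -- xfnamerev = xfname[::-1] is reverse (PySem.List.slice?_none_none_neg_one);
    -- out = loop over xfnamerev, then out = out[::-1], then '[s' + out + ']'
    some (String.ofList ('[' :: 's' :: ((prepXFA_loop xfname.toList.reverse []).reverse ++ [']'])))

-- ===== PORT B =====
def prepXFShortname_alt (xfname : String) : Option String :=
  if PySem.Str.len xfname = 0 then none
  else
    -- ds = [c for c in xfname if c.isdigit()]; result = '[s' + ''.join(ds[-2:]) + ']'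
    some (String.ofList ('[' :: 's' ::
      (PySem.List.slice (xfname.toList.filter PySem.Chars.isdigit) (some (-2)) none ++ [']'])))

-- ===== PRECONDITION & SPEC =====
def Spec_prepXFShortname (xfname : String) (out : Option String) : Prop := out = prepXFShortname_alt xfname
instance (xfname : String) (out : Option String) : Decidable (Spec_prepXFShortname xfname out) := by unfold Spec_prepXFShortname; infer_instance

-- ===== CLAIM (what is proved, stated in full; the proofs are below) =====
def Claim_equal_prepXFShortname : Prop := ∀ (xfname : String), Dom_prepXFShortname xfname → Spec_prepXFShortname xfname (prepXFShortname xfname)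

-- ===== LEMMAS AND PROOFS =====

-- A's break-at-2 loop collects the first (2 - |acc|) digits of its input, in order.
theorem prepXFA_loop_eq (l acc : List Char) (h : acc.length ≤ 2) :
    prepXFA_loop l acc = acc ++ (l.filter PySem.Chars.isdigit).take (2 - acc.length) := by
  induction l generalizing acc with
  | nil => simp [prepXFA_loop]
  | cons c rest ih =>
    simp only [prepXFA_loop, List.filter]
    by_cases hd : PySem.Chars.isdigit c
    · simp only [hd, if_pos]
      by_cases hlt : acc.length < 2
      · rw [ih (acc ++ [c]) (by simp; omega)]
        have h3 : 2 - acc.length = (2 - (acc ++ [c]).length) + 1 := by simp; omega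
        simp [h3, List.take_succ_cons]
        omega
      · have h2 : acc.length = 2 := by omega
        simp [h2]
    · simp only [hd, if_neg, Bool.false_eq_true, not_false_iff]
      exact ih acc h

-- ===== VERDICT (by name: the statement is the Claim_ definition above) =====
theorem prepXFShortname_spec : Claim_equal_prepXFShortname := by
  intro xfname _
  unfold Spec_prepXFShortname prepXFShortname prepXFShortname_alt
  split_ifs with h0
  · rfl
  · rw [prepXFA_loop_eq _ [] (by simp)]
    rw [PySem.List.slice_from_neg_ofNat _ 2 (by omega)]
    simp only [List.nil_append, List.length_nil, Nat.sub_zero]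
    rw [List.filter_reverse, List.take_reverse, List.reverse_reverse]
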